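-- pv_equiv track=rewrite | github.com/Kitzoomer/treta | core/execution_focus_engine.py | select_active
-- ===== SOURCE A (Python) =====
-- from typing import Any, Dict, Iterable, List
--
-- def select_active(proposals: Iterable[Dict[str, Any]], launches: Iterable[Dict[str, Any]]) -> str | None:
--     """
--     Returns ID of the single active execution target.
--     Priority order:
--
--     1) Proposal with status "building"
--     2) Proposal with status "approved"
--     3) Launch with status not "launched"
--     4) None
--     """
--     proposal_items: List[Dict[str, Any]] = list(proposals)
--     launch_items: List[Dict[str, Any]] = list(launches)
--
--     for proposal in reversed(proposal_items):
--         if str(proposal.get("status", "")).strip() == "building":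
--             return str(proposal.get("id", "")).strip() or None
--
--     for proposal in reversed(proposal_items):
--         if str(proposal.get("status", "")).strip() == "approved":
--             return str(proposal.get("id", "")).strip() or None
--
--     for launch in reversed(launch_items):
--         if str(launch.get("status", "")).strip() != "launched":
--             return str(launch.get("id", "")).strip() or None
--
--     return None
-- ===== SOURCE B (Python) =====
-- def select_active(proposals, launches):
--     # One forward pass over proposals keeping the LAST "building" and LAST
--     # "approved" match (last forward == first in A's reversed scan), storing
--     # the computed stripped-id-or-None so an empty id still wins its slot.
--     building = None
--     approved = None
--     for p in proposals:
--         s = str(p.get("status", "")).strip()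
--         if s == "building":
--             building = (str(p.get("id", "")).strip() or None,)
--         elif s == "approved":
--             approved = (str(p.get("id", "")).strip() or None,)
--     if building is not None:
--         return building[0]
--     if approved is not None:
--         return approved[0]
--     fallback = None
--     for l in launches:
--         if str(l.get("status", "")).strip() != "launched":
--             fallback = (str(l.get("id", "")).strip() or None,)
--     return fallback[0] if fallback is not None else None
-- ===== Notes on version B (the rewrite author's own statement) =====
-- stated objective: alternative
-- what changed: Replaces A's three reversed early-return scans by a single forward overwrite pass over proposals maintaining last-building/last-approved candidate slots, plus a forward overwrite pass over launches; no reversal or early return.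
import Mathlib
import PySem

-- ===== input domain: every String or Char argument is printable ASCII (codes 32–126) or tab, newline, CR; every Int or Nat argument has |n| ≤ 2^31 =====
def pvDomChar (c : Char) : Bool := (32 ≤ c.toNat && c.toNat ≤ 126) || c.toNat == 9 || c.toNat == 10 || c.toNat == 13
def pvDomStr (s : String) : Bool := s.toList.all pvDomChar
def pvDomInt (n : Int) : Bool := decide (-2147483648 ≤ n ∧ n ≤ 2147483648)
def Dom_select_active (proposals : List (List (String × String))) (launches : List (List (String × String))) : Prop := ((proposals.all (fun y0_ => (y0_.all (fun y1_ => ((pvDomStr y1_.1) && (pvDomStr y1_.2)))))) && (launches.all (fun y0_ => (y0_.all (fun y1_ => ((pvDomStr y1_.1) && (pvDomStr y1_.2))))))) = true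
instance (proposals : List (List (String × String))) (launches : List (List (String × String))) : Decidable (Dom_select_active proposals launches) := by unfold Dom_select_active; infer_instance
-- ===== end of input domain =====

-- B replaces A's three reversed early-return scans by forward overwrite passes
-- keeping last-match candidate slots (alternative decomposition, same cost).

-- shared primitive: str(d.get(k, "")).strip()
def pvField (d : List (String × String)) (k : String) : String :=
  PySem.Str.strip (PySem.Dict.getD (PySem.Dict.mk d) k "")

-- shared primitive: str(d.get("id", "")).strip() or None
def pvIdOrNone (d : List (String × String)) : Option String :=
  let i := pvField d "id"
  if i == "" then none else some i

-- ===== PORT A =====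
-- first reversed proposal with given status: loop with early return
def pvScanA (items : List (List (String × String))) (st : String) : Option (Option String) :=
  match items with
  | [] => none
  | d :: rest =>
    if pvField d "status" == st then some (pvIdOrNone d) else pvScanA rest st

-- first reversed launch with status != "launched"
def pvScanLaunchA (items : List (List (String × String))) : Option (Option String) :=
  match items with
  | [] => none
  | d :: rest =>
    if pvField d "status" != "launched" then some (pvIdOrNone d) else pvScanLaunchA rest

def select_active (proposals : List (List (String × String))) (launches : List (List (String × String))) : Option String :=
  match pvScanA proposals.reverse "building" with
  | some r => r
  | none =>
    match pvScanA proposals.reverse "approved" with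
    | some r => r
    | none =>
      match pvScanLaunchA launches.reverse with
      | some r => r
      | none => none

-- ===== PORT B =====
-- forward overwrite step over proposals: (building slot, approved slot)
def pvStepB (acc : Option (Option String) × Option (Option String)) (p : List (String × String)) :
    Option (Option String) × Option (Option String) :=
  let s := pvField p "status"
  if s == "building" then (some (pvIdOrNone p), acc.2)
  else if s == "approved" then (acc.1, some (pvIdOrNone p))
  else acc

def pvStepLaunchB (acc : Option (Option String)) (l : List (String × String)) : Option (Option String) :=
  if pvField l "status" != "launched" then some (pvIdOrNone l) else acc

def select_active_alt (proposals : List (List (String × String))) (launches : List (List (String × String))) : Option String :=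
  let slots := proposals.foldl pvStepB (none, none)
  match slots.1 with
  | some r => r
  | none =>
    match slots.2 with
    | some r => r
    | none =>
      match launches.foldl pvStepLaunchB none with
      | some r => r
      | none => none

-- ===== PRECONDITION & SPEC =====
def Spec_select_active (proposals : List (List (String × String))) (launches : List (List (String × String))) (out : Option String) : Prop := out = select_active_alt proposals launches
instance (proposals : List (List (String × String))) (launches : List (List (String × String))) (out : Option String) : Decidable (Spec_select_active proposals launches out) := by unfold Spec_select_active; infer_instance

-- ===== CLAIM (what is proved, stated in full; the proofs are below) =====
def Claim_equal_select_active : Prop := ∀ (proposals : List (List (String × String))) (launches : List (List (String × String))), Dom_select_active proposals launches → Spec_select_active proposals launches (select_active proposals launches)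

-- ===== LEMMAS AND PROOFS =====

-- forward overwrite pass over proposals = reversed first-match scans
theorem foldl_pvStepB (xs : List (List (String × String)))
    (b0 a0 : Option (Option String)) :
    xs.foldl pvStepB (b0, a0) =
      ((pvScanA xs.reverse "building").elim b0 some,
       (pvScanA xs.reverse "approved").elim a0 some) := by
  induction xs using List.reverseRecOn generalizing b0 a0 with
  | nil => simp [pvScanA]
  | append_singleton xs x ih =>
    rw [List.foldl_append, ih]
    simp only [List.reverse_append, List.reverse_singleton, List.singleton_append]
    by_cases hb : pvField x "status" == "building"
    · have ha : ¬ (pvField x "status" == "approved") := by simp_all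
      simp [pvStepB, pvScanA, hb, ha]
    · by_cases ha : pvField x "status" == "approved"
      · simp [pvStepB, pvScanA, hb, ha]
      · simp [pvStepB, pvScanA, hb, ha]

-- forward overwrite pass over launches = reversed first-match scan
theorem foldl_pvStepLaunchB (xs : List (List (String × String)))
    (f0 : Option (Option String)) :
    xs.foldl pvStepLaunchB f0 = (pvScanLaunchA xs.reverse).elim f0 some := by
  induction xs using List.reverseRecOn generalizing f0 with
  | nil => simp [pvScanLaunchA]
  | append_singleton xs x ih =>
    rw [List.foldl_append, ih]
    simp only [List.reverse_append, List.reverse_singleton, List.singleton_append]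
    by_cases h : pvField x "status" != "launched"
    · simp [pvStepLaunchB, pvScanLaunchA, h]
    · simp [pvStepLaunchB, pvScanLaunchA, h]

-- ===== VERDICT (by name: the statement is the Claim_ definition above) =====
theorem select_active_spec : Claim_equal_select_active := by
  intro proposals launches _
  unfold Spec_select_active select_active select_active_alt
  rw [foldl_pvStepB, foldl_pvStepLaunchB]
  cases pvScanA proposals.reverse "building" with
  | some r => simp
  | none =>
    cases pvScanA proposals.reverse "approved" with
    | some r => simp
    | none =>
      cases pvScanLaunchA launches.reverse with
      | some r => simp
      | none => simp
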